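-- pv_equiv track=rewrite | github.com/xiangyu-zhong/UAVFL | modules/operations_base.py | GetIndexRange
-- ===== SOURCE A (Python) =====
-- def GetIndexRange(users_num_list, ps_num_list):
--     IndexRange = []
--     pre = 0
--     subsystemNum = len(users_num_list)
--     for i in range(subsystemNum):
--         for j in range(ps_num_list[i]):
--             IndexRange.append((pre, pre+users_num_list[i]-1))
--             pre += users_num_list[i]
--     return IndexRange
-- ===== SOURCE B (Python) =====
-- def GetIndexRange(users_num_list, ps_num_list):
--     # Phase 1: flatten into a list of block widths (same indexing, same IndexError).
--     widths = []
--     for i in range(len(users_num_list)):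
--         widths.extend([users_num_list[i]] * ps_num_list[i])
--     # Phase 2: prefix-sum the widths to get each block's start offset.
--     starts = []
--     s = 0
--     for w in widths:
--         starts.append(s)
--         s += w
--     return [(s0, s0 + w - 1) for s0, w in zip(starts, widths)]
-- ===== Notes on version B (the rewrite author's own statement) =====
-- stated objective: alternative
-- what changed: Replaces the interleaved accumulate-while-appending nested loop by three separate passes: flatten the counts into a list of block widths, prefix-sum the widths into start offsets, then zip them into (start, start+width-1) tuples.
import Mathlib
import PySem

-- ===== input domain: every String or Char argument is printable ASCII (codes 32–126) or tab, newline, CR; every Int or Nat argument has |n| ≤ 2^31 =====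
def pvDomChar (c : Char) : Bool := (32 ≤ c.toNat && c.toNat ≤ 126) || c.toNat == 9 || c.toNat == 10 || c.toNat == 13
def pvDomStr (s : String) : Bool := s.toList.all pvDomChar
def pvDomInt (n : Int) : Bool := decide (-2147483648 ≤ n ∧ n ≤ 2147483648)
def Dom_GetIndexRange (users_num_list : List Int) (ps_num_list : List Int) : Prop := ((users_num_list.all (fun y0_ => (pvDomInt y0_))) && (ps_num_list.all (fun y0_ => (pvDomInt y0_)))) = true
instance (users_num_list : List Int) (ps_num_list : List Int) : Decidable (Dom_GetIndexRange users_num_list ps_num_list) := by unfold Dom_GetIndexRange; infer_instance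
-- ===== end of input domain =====

-- B re-decomposes A's interleaved accumulate-and-append nested loop into three passes
-- (flatten widths, prefix-sum starts, zip into pairs); equivalence of return values is proved.

-- ===== PORT A =====
-- nested loop: for i in range(len(users)): for j in range(ps[i]): append (pre, pre+u[i]-1); pre += u[i]
-- (ps[i]/users[i] are in range under Pre_; .getD 0 is never the value used inside Pre_)
def GetIndexRange (users_num_list : List Int) (ps_num_list : List Int) : List (Int × Int) :=
  ((List.range users_num_list.length).foldl
    (fun (st : List (Int × Int) × Int) (i : Nat) =>
      let ui := (PySem.List.pyGet? users_num_list (i : Int)).getD 0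
      let pi := (PySem.List.pyGet? ps_num_list (i : Int)).getD 0
      (List.range pi.toNat).foldl
        (fun (st2 : List (Int × Int) × Int) _ =>
          (st2.1 ++ [(st2.2, st2.2 + ui - 1)], st2.2 + ui)) st)
    ([], 0)).1

-- ===== PORT B =====
def GetIndexRange_alt (users_num_list : List Int) (ps_num_list : List Int) : List (Int × Int) :=
  -- Phase 1: widths
  let widths := (List.range users_num_list.length).foldl
    (fun (ws : List Int) (i : Nat) =>
      ws ++ List.replicate ((PySem.List.pyGet? ps_num_list (i : Int)).getD 0).toNat
                           ((PySem.List.pyGet? users_num_list (i : Int)).getD 0)) []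
  -- Phase 2: prefix-sum starts
  let starts := (widths.foldl (fun (p : List Int × Int) w => (p.1 ++ [p.2], p.2 + w)) ([], 0)).1
  -- Phase 3: zip into pairs
  (starts.zip widths).map (fun sw => (sw.1, sw.1 + sw.2 - 1))

-- ===== PRECONDITION & SPEC =====
-- Pre_ excludes exactly the inputs where Python A raises IndexError: ps_num_list shorter than users_num_list.
def Pre_GetIndexRange (users_num_list : List Int) (ps_num_list : List Int) : Prop :=
  users_num_list.length ≤ ps_num_list.length
instance (users_num_list : List Int) (ps_num_list : List Int) : Decidable (Pre_GetIndexRange users_num_list ps_num_list) := by unfold Pre_GetIndexRange; infer_instance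
def pvWitness_GetIndexRange : List Int × List Int := ([3, 2], [2, 1])

def Spec_GetIndexRange (users_num_list : List Int) (ps_num_list : List Int) (out : List (Int × Int)) : Prop := out = GetIndexRange_alt users_num_list ps_num_list
instance (users_num_list : List Int) (ps_num_list : List Int) (out : List (Int × Int)) : Decidable (Spec_GetIndexRange users_num_list ps_num_list out) := by unfold Spec_GetIndexRange; infer_instance

-- ===== CLAIM (what is proved, stated in full; the proofs are below) =====
def Claim_equal_GetIndexRange : Prop := ∀ (users_num_list : List Int) (ps_num_list : List Int), Dom_GetIndexRange users_num_list ps_num_list → Pre_GetIndexRange users_num_list ps_num_list → Spec_GetIndexRange users_num_list ps_num_list (GetIndexRange users_num_list ps_num_list)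

-- ===== LEMMAS AND PROOFS =====

/-- The list of (start, start+w-1) pairs emitted for widths `ws` starting at offset `s`. -/
def pvEmit : List Int → Int → List (Int × Int)
  | [], _ => []
  | w :: ws, s => (s, s + w - 1) :: pvEmit ws (s + w)

theorem pvEmit_append (ws1 ws2 : List Int) (s : Int) :
    pvEmit (ws1 ++ ws2) s = pvEmit ws1 s ++ pvEmit ws2 (s + ws1.sum) := by
  induction ws1 generalizing s with
  | nil => simp [pvEmit]
  | cons w t ih => simp [pvEmit, ih, add_assoc]

/-- A's inner loop over `range k` with fixed width `w`. -/
theorem pvInner (w : Int) (k : Nat) (acc : List (Int × Int)) (pre : Int) :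
    (List.range k).foldl
      (fun (st2 : List (Int × Int) × Int) _ => (st2.1 ++ [(st2.2, st2.2 + w - 1)], st2.2 + w))
      (acc, pre)
    = (acc ++ pvEmit (List.replicate k w) pre, pre + k * w) := by
  induction k with
  | zero => simp [pvEmit]
  | succ n ih =>
      rw [List.range_succ, List.foldl_append, ih]
      rw [List.replicate_succ', pvEmit_append]
      simp [pvEmit, List.sum_replicate, mul_comm]
      ring

/-- B's prefix-sum loop produces exactly the starts of `pvEmit`. -/
theorem pvStarts (ws : List Int) (acc : List Int) (s : Int) :
    ws.foldl (fun (p : List Int × Int) w => (p.1 ++ [p.2], p.2 + w)) (acc, s)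
    = (acc ++ (pvEmit ws s).map Prod.fst, s + ws.sum) := by
  induction ws generalizing acc s with
  | nil => simp [pvEmit]
  | cons w t ih => simp [pvEmit, ih, add_assoc]

theorem pvZip (ws : List Int) (s : Int) :
    ((((pvEmit ws s).map Prod.fst).zip ws).map (fun sw => (sw.1, sw.1 + sw.2 - 1)))
    = pvEmit ws s := by
  induction ws generalizing s with
  | nil => simp [pvEmit]
  | cons w t ih => simp [pvEmit, ih]

/-- A's outer loop equals pvEmit of B's widths. -/
theorem pvOuter (users ps : List Int) (n : Nat) (acc : List (Int × Int)) (pre : Int) :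
    (List.range n).foldl
      (fun (st : List (Int × Int) × Int) (i : Nat) =>
        let ui := (PySem.List.pyGet? users (i : Int)).getD 0
        let pi := (PySem.List.pyGet? ps (i : Int)).getD 0
        (List.range pi.toNat).foldl
          (fun (st2 : List (Int × Int) × Int) _ =>
            (st2.1 ++ [(st2.2, st2.2 + ui - 1)], st2.2 + ui)) st)
      (acc, pre)
    = (let W := (List.range n).foldl
        (fun (ws : List Int) (i : Nat) =>
          ws ++ List.replicate ((PySem.List.pyGet? ps (i : Int)).getD 0).toNat
                               ((PySem.List.pyGet? users (i : Int)).getD 0)) []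
       (acc ++ pvEmit W pre, pre + W.sum)) := by
  induction n with
  | zero => simp [pvEmit]
  | succ m ih =>
      rw [List.range_succ, List.foldl_append, List.foldl_append, ih]
      simp only [List.foldl]
      rw [pvInner, pvEmit_append]
      simp [List.sum_replicate, mul_comm, add_assoc]

-- ===== VERDICT (by name: the statement is the Claim_ definition above) =====
theorem GetIndexRange_spec : Claim_equal_GetIndexRange := by
  intro users ps _ _
  unfold Spec_GetIndexRange GetIndexRange GetIndexRange_alt
  rw [pvOuter]
  simp only []
  rw [pvStarts]
  simp [pvZip]
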